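-- pv_equiv track=rewrite | github.com/RedFoxFinn/tsoha_k23 | tools/data_filter.py | filter_chats
-- ===== SOURCE A (Python) =====
-- _filtering_modes = ["ALL","PUBLIC","LOGIN","AGE","SECURITY"]
--
-- def filter_chats(chats:list, filtering:str):
--     if filtering not in _filtering_modes:
--         return None
--     if filtering == _filtering_modes[0]:
--         return chats
--     if filtering == _filtering_modes[1]:
--         _filtered = [chat for chat in chats if chat[5] == "NONE"]
--         return _filtered
--     if filtering == _filtering_modes[2]:
--         _filtered = [chat for chat in chats if chat[5] == "LOGIN"]
--         return _filtered
--     if filtering == _filtering_modes[3]: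
--         _filtered = [chat for chat in chats if chat[5] == "AGE"]
--         return _filtered
--     if filtering == _filtering_modes[4]:
--         _filtered = [chat for chat in chats if chat[5] == "SEC"]
--         return _filtered
-- ===== SOURCE B (Python) =====
-- _mode_value = {"PUBLIC": "NONE", "LOGIN": "LOGIN", "AGE": "AGE", "SECURITY": "SEC"}
--
-- def filter_chats(chats: list, filtering: str):
--     if filtering == "ALL":
--         return chats
--     value = _mode_value.get(filtering)
--     if value is None:
--         return None
--     # build a group-by index over chat[5] in one pass, then answer by bucket lookup
--     buckets = {}
--     for chat in chats:
--         buckets.setdefault(chat[5], []).append(chat)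
--     return buckets.get(value, [])
-- ===== Notes on version B (the rewrite author's own statement) =====
-- stated objective: alternative
-- what changed: Instead of filtering with a mode-specific predicate, B builds a group-by index (dict of buckets keyed by chat[5]) in one pass and answers each mode by a single bucket lookup.
import Mathlib
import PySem

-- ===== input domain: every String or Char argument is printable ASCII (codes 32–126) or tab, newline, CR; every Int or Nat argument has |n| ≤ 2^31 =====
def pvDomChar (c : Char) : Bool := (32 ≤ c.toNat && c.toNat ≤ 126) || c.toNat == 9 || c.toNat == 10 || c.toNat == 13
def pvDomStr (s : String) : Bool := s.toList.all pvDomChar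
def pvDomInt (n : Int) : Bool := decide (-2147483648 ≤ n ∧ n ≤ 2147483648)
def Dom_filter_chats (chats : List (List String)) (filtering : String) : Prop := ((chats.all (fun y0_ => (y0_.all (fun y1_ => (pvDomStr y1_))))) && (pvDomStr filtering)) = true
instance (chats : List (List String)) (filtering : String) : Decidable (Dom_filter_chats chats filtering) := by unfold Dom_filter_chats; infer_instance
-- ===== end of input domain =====

-- B replaces the per-mode filtering passes by a group-by index over chat[5] plus a bucket lookup (alternative).

-- ===== PORT A =====
def pvModes : List String := ["ALL", "PUBLIC", "LOGIN", "AGE", "SECURITY"]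

def filter_chats (chats : List (List String)) (filtering : String) : Option (List (List String)) :=
  if ¬ (pvModes.contains filtering) then none
  else if some filtering = PySem.List.pyGet? pvModes 0 then some chats
  else if some filtering = PySem.List.pyGet? pvModes 1 then
    some (chats.filter (fun chat => PySem.List.pyGet? chat 5 == some "NONE"))
  else if some filtering = PySem.List.pyGet? pvModes 2 then
    some (chats.filter (fun chat => PySem.List.pyGet? chat 5 == some "LOGIN"))
  else if some filtering = PySem.List.pyGet? pvModes 3 then
    some (chats.filter (fun chat => PySem.List.pyGet? chat 5 == some "AGE"))
  else if some filtering = PySem.List.pyGet? pvModes 4 then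
    some (chats.filter (fun chat => PySem.List.pyGet? chat 5 == some "SEC"))
  else none  -- Python falls off the end: returns None

-- ===== PORT B =====
def pvModeValue : PySem.Dict String String :=
  PySem.Dict.ofList [("PUBLIC", "NONE"), ("LOGIN", "LOGIN"), ("AGE", "AGE"), ("SECURITY", "SEC")]

-- chat[5] raises for rows shorter than 6 (excluded by Pre_); `.getD ""` makes the port total there.
def filter_chats_alt (chats : List (List String)) (filtering : String) : Option (List (List String)) :=
  if filtering = "ALL" then some chats
  else
    match PySem.Dict.get? pvModeValue filtering with
    | none => none
    | some value =>
      let buckets := chats.foldl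
        (fun d chat => d.modify ((PySem.List.pyGet? chat 5).getD "") [] (· ++ [chat]))
        PySem.Dict.empty
      some (buckets.getD value [])

-- ===== PRECONDITION & SPEC =====
-- Pre_ excludes exactly the inputs where Python A raises IndexError: a row shorter than 6
-- while filtering is one of the non-ALL modes (chat[5] is evaluated there).
def Pre_filter_chats (chats : List (List String)) (filtering : String) : Prop :=
  filtering ∈ (["PUBLIC", "LOGIN", "AGE", "SECURITY"] : List String) →
    ∀ c ∈ chats, 6 ≤ c.length
instance (chats : List (List String)) (filtering : String) : Decidable (Pre_filter_chats chats filtering) := by unfold Pre_filter_chats; infer_instance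

def pvWitness_filter_chats : List (List String) × String :=
  ([["a", "b", "c", "d", "e", "NONE"], ["f", "g", "h", "i", "j", "SEC"]], "PUBLIC")

def Spec_filter_chats (chats : List (List String)) (filtering : String) (out : Option (List (List String))) : Prop := out = filter_chats_alt chats filtering
instance (chats : List (List String)) (filtering : String) (out : Option (List (List String))) : Decidable (Spec_filter_chats chats filtering out) := by unfold Spec_filter_chats; infer_instance

-- ===== CLAIM (what is proved, stated in full; the proofs are below) =====
def Claim_equal_filter_chats : Prop := ∀ (chats : List (List String)) (filtering : String), Dom_filter_chats chats filtering → Pre_filter_chats chats filtering → Spec_filter_chats chats filtering (filter_chats chats filtering)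

-- ===== LEMMAS AND PROOFS =====

-- the bucket of the group-by index is exactly the filter by chat[5]
theorem pv_bucket_eq_filter (chats : List (List String)) (v : String)
    (h : ∀ c ∈ chats, 6 ≤ c.length) :
    (chats.foldl
        (fun d chat => d.modify ((PySem.List.pyGet? chat 5).getD "") [] (· ++ [chat]))
        PySem.Dict.empty).getD v []
      = chats.filter (fun chat => PySem.List.pyGet? chat 5 == some v) := by
  have key :
      chats.foldl
          (fun d chat => d.modify ((PySem.List.pyGet? chat 5).getD "") [] (· ++ [chat]))
          PySem.Dict.empty
        = ((chats.map (fun chat => (((PySem.List.pyGet? chat 5).getD ""), chat))).foldl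
            (fun (d : PySem.Dict String (List (List String))) p => d.modify p.1 [] (· ++ [p.2]))
            PySem.Dict.empty) :=
    (List.foldl_map (f := fun chat => (((PySem.List.pyGet? chat 5).getD ""), chat))
      (g := fun (d : PySem.Dict String (List (List String))) p => d.modify p.1 [] (· ++ [p.2]))
      (l := chats) (init := PySem.Dict.empty)).symm
  rw [key, PySem.Dict.getD_foldl_modify_append]
  simp only [PySem.Dict.getD_empty, List.nil_append, List.filter_map, List.map_map]
  rw [show ((fun (p : String × List String) => p.2) ∘
        (fun chat => (((PySem.List.pyGet? chat 5).getD ""), chat))) = id from rfl,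
    List.map_id]
  refine List.filter_congr fun c hc => ?_
  have h6 := h c hc
  have hg := PySem.List.pyGet?_ofNat (xs := c) (n := 5) (by omega)
  rw [(by norm_num : ((5 : Nat) : Int) = (5 : Int))] at hg
  simp [Function.comp, hg]

-- ===== VERDICT (by name: the statement is the Claim_ definition above) =====
theorem filter_chats_spec : Claim_equal_filter_chats := by
  intro chats filtering _ hpre
  unfold Spec_filter_chats filter_chats filter_chats_alt pvModes
  by_cases h0 : filtering = "ALL"
  · subst h0; rfl
  by_cases h1 : filtering = "PUBLIC"
  · subst h1
    rw [if_neg (by decide), if_neg (by decide), if_pos (by decide), if_neg (by decide)]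
    show some _ = some ((chats.foldl
        (fun d chat => d.modify ((PySem.List.pyGet? chat 5).getD "") [] (· ++ [chat]))
        PySem.Dict.empty).getD "NONE" [])
    rw [pv_bucket_eq_filter _ _ (hpre (by decide))]
  by_cases h2 : filtering = "LOGIN"
  · subst h2
    rw [if_neg (by decide), if_neg (by decide), if_neg (by decide), if_pos (by decide),
      if_neg (by decide)]
    show some _ = some ((chats.foldl
        (fun d chat => d.modify ((PySem.List.pyGet? chat 5).getD "") [] (· ++ [chat]))
        PySem.Dict.empty).getD "LOGIN" [])
    rw [pv_bucket_eq_filter _ _ (hpre (by decide))]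
  by_cases h3 : filtering = "AGE"
  · subst h3
    rw [if_neg (by decide), if_neg (by decide), if_neg (by decide), if_neg (by decide),
      if_pos (by decide), if_neg (by decide)]
    show some _ = some ((chats.foldl
        (fun d chat => d.modify ((PySem.List.pyGet? chat 5).getD "") [] (· ++ [chat]))
        PySem.Dict.empty).getD "AGE" [])
    rw [pv_bucket_eq_filter _ _ (hpre (by decide))]
  by_cases h4 : filtering = "SECURITY"
  · subst h4
    rw [if_neg (by decide), if_neg (by decide), if_neg (by decide), if_neg (by decide),
      if_neg (by decide), if_pos (by decide), if_neg (by decide)]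
    show some _ = some ((chats.foldl
        (fun d chat => d.modify ((PySem.List.pyGet? chat 5).getD "") [] (· ++ [chat]))
        PySem.Dict.empty).getD "SEC" [])
    rw [pv_bucket_eq_filter _ _ (hpre (by decide))]
  · have hmk : pvModeValue = PySem.Dict.mk
        [("PUBLIC", "NONE"), ("LOGIN", "LOGIN"), ("AGE", "AGE"), ("SECURITY", "SEC")] := by decide
    have hd : PySem.Dict.get? pvModeValue filtering = none := by
      rw [hmk]
      simp only [PySem.Dict.get?_mk_cons, beq_iff_eq]
      rw [if_neg (Ne.symm h1), if_neg (Ne.symm h2), if_neg (Ne.symm h3), if_neg (Ne.symm h4)]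
      rfl
    have hc : ¬ (["ALL", "PUBLIC", "LOGIN", "AGE", "SECURITY"] : List String).contains
        filtering = true := by
      simp only [List.contains_cons, List.contains_nil, Bool.or_eq_true, beq_iff_eq]
      intro hor
      rcases hor with h | h | h | h | h | h
      · exact h0 h
      · exact h1 h
      · exact h2 h
      · exact h3 h
      · exact h4 h
      · simp at h
    rw [if_pos hc, if_neg h0, hd]
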